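-- pv_equiv track=rewrite | github.com/Kewen526/jiangxin_data_code | report_generator.py | clean_sheet_name
-- ===== SOURCE A (Python) =====
-- def clean_sheet_name(name, max_length=31):
--     """
--     清理 Sheet 名称，符合 Excel 规范
--     - 最大 31 字符
--     - 不能包含: \ / * ? : [ ]
--     """
--     if not name:
--         return "Sheet"
--
--     # 替换非法字符
--     illegal_chars = ['\\', '/', '*', '?', ':', '[', ']']
--     for char in illegal_chars:
--         name = name.replace(char, '')
--
--     # 截断到最大长度
--     if len(name) > max_length:
--         name = name[:max_length]
--
--     return name or "Sheet"
-- ===== SOURCE B (Python) =====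
-- ILLEGAL = '\\/*?:[]'
--
-- def clean_sheet_name(name, max_length=31):
--     """Excel sheet-name sanitizer: one accumulator pass collecting legal chars,
--     truncating the char list, instead of seven whole-string replace passes."""
--     if not name:
--         return "Sheet"
--     kept = []
--     for c in name:
--         if c not in ILLEGAL:
--             kept.append(c)
--     if len(kept) > max_length:
--         kept = kept[:max_length]
--     return ''.join(kept) or "Sheet"
-- ===== Notes on version B (the rewrite author's own statement) =====
-- stated objective: simpler
-- what changed: Replaces seven sequential whole-string str.replace passes with a single accumulator loop that appends each legal character to a list, truncates the list, and joins once at the end.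
import Mathlib
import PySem

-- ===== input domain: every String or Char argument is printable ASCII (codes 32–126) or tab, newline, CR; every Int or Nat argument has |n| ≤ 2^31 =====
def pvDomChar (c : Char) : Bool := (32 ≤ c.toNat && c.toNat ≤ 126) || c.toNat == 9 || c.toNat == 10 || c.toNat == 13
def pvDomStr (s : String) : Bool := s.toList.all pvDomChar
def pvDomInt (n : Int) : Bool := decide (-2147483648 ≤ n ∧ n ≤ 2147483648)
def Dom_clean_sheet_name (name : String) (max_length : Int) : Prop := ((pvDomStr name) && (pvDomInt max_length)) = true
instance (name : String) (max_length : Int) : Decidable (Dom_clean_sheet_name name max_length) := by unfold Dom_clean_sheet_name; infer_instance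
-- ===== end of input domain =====

-- B replaces A's seven sequential whole-string str.replace passes with one
-- accumulator loop collecting the legal characters, then a list truncation
-- and a single join (objective: simpler).

-- ===== PORT A =====
-- A's illegal-character list, in A's order
def pvIllegalList : List Char := ['\\', '/', '*', '?', ':', '[', ']']

def clean_sheet_name (name : String) (max_length : Int) : String :=
  if name = "" then "Sheet"
  else
    -- for char in illegal_chars: name = name.replace(char, '')
    let name := pvIllegalList.foldl (fun s c => PySem.Str.replace s (String.ofList [c]) "") name
    -- if len(name) > max_length: name = name[:max_length]
    let name := if max_length < PySem.Str.len name then PySem.Str.slice name none (some max_length) else name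
    if name = "" then "Sheet" else name

-- ===== PORT B =====
-- ILLEGAL = '\\/*?:[]'; `c not in ILLEGAL` for a single char c is membership
-- among the string's characters, ported as List.contains on its char list.
def pvIllegal : List Char := "\\/*?:[]".toList

def clean_sheet_name_alt (name : String) (max_length : Int) : String :=
  if name = "" then "Sheet"
  else
    -- kept = []; for c in name: if c not in ILLEGAL: kept.append(c)
    let kept := name.toList.foldl (fun acc c => if pvIllegal.contains c then acc else acc ++ [c]) []
    -- if len(kept) > max_length: kept = kept[:max_length]
    let kept := if max_length < (kept.length : Int) then PySem.List.slice kept none (some max_length) else kept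
    -- return ''.join(kept) or "Sheet"
    let joined := String.ofList kept
    if joined = "" then "Sheet" else joined

-- ===== PRECONDITION & SPEC =====
def Spec_clean_sheet_name (name : String) (max_length : Int) (out : String) : Prop := out = clean_sheet_name_alt name max_length
instance (name : String) (max_length : Int) (out : String) : Decidable (Spec_clean_sheet_name name max_length out) := by unfold Spec_clean_sheet_name; infer_instance

-- ===== CLAIM (what is proved, stated in full; the proofs are below) =====
def Claim_equal_clean_sheet_name : Prop := ∀ (name : String) (max_length : Int), Dom_clean_sheet_name name max_length → Spec_clean_sheet_name name max_length (clean_sheet_name name max_length)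

-- ===== LEMMAS AND PROOFS =====

-- replace.go for a single-char pattern and empty replacement filters that char out
theorem go_singleton_filter (c : Char) (fuel : Nat) (l acc : List Char)
    (h : l.length ≤ fuel) :
    PySem.Chars.replace.go [c] [] fuel l acc = acc.reverse ++ l.filter (fun x => x ≠ c) := by
  induction fuel generalizing l acc with
  | zero =>
    interval_cases hl : l.length
    · simp [List.length_eq_zero_iff.mp hl, PySem.Chars.replace.go]
  | succ n ih =>
    cases l with
    | nil => simp [PySem.Chars.replace.go]
    | cons x t =>
      by_cases hx : x = c
      · have : List.isPrefixOf [c] (x :: t) = true := by simp [List.isPrefixOf, hx]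
        rw [PySem.Chars.replace.go]
        simp only [this, if_pos]
        simp only [List.length_cons] at h
        rw [ih _ _ (by simpa using Nat.le_of_succ_le_succ h)]
        simp [hx]
      · have hpre : List.isPrefixOf [c] (x :: t) = false := by
          simp [List.isPrefixOf]; exact fun h => absurd h.symm hx
        rw [PySem.Chars.replace.go]
        simp only [hpre, Bool.false_eq_true, if_neg, not_false_eq_true]
        simp only [List.length_cons] at h
        rw [ih _ _ (Nat.le_of_succ_le_succ h)]
        simp [hx]

theorem replace_singleton_filter (s : List Char) (c : Char) :
    PySem.Chars.replace s [c] [] = s.filter (fun x => x ≠ c) := by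
  rw [PySem.Chars.replace]
  simp only [List.isEmpty_cons, Bool.false_eq_true, if_neg, not_false_eq_true]
  rw [go_singleton_filter c s.length s [] (le_refl _)]
  simp

-- A's sequence of single-char replaces filters out every char of the list
theorem foldl_replace_filter (l : List Char) (s : String) :
    (l.foldl (fun s c => PySem.Str.replace s (String.ofList [c]) "") s).toList
      = s.toList.filter (fun x => !(l.contains x)) := by
  induction l generalizing s with
  | nil => simp
  | cons c t ih =>
    rw [List.foldl_cons, ih]
    rw [PySem.Str.toList_replace]
    simp only [String.toList_ofList, show ("" : String).toList = [] from rfl]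
    rw [replace_singleton_filter]
    rw [List.filter_filter]
    apply List.filter_congr
    intro x _
    by_cases hx : x = c <;> simp [hx]

-- B's accumulator loop is the same filter (via PySem.List.foldl_append_if_eq_filter)
theorem kept_eq_filter (name : String) :
    name.toList.foldl (fun acc c => if pvIllegal.contains c then acc else acc ++ [c]) []
      = name.toList.filter (fun x => !(pvIllegalList.contains x)) := by
  have hfun : (fun (acc : List Char) c => if pvIllegal.contains c then acc else acc ++ [c])
      = (fun (acc : List Char) c => if (!(pvIllegal.contains c)) = true then acc ++ [c] else acc) := by
    funext acc c
    by_cases hc : pvIllegal.contains c <;> simp [hc]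
  rw [hfun]
  have h := PySem.List.foldl_append_if_eq_filter
    (l := name.toList) (acc := ([] : List Char))
    (p := fun c => !(pvIllegal.contains c))
  simp only [List.nil_append] at h
  rw [h]
  have : pvIllegal = pvIllegalList := by decide
  rw [this]

-- A's string slice is B's list slice under toList
theorem str_slice_toList (s : String) (m : Int) :
    (PySem.Str.slice s none (some m)).toList = PySem.List.slice s.toList none (some m) := by
  simp [PySem.Str.slice]

-- ===== VERDICT (by name: the statement is the Claim_ definition above) =====
theorem clean_sheet_name_spec : Claim_equal_clean_sheet_name := by
  intro name max_length _
  unfold Spec_clean_sheet_name clean_sheet_name clean_sheet_name_alt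
  by_cases h : name = ""
  · simp [h]
  · simp only [h, if_false]
    rw [kept_eq_filter]
    set f := name.toList.filter (fun x => !(pvIllegalList.contains x)) with hf
    have hA : (pvIllegalList.foldl (fun s c => PySem.Str.replace s (String.ofList [c]) "") name) = String.ofList f := by
      have h2 := congrArg String.ofList (foldl_replace_filter pvIllegalList name)
      rwa [String.ofList_toList] at h2
    rw [hA]
    have hlen : PySem.Str.len (String.ofList f) = (f.length : Int) := by
      simp [PySem.Str.len_eq]
    rw [hlen]
    by_cases hm : max_length < (f.length : Int)
    · simp only [hm, if_pos]
      rw [show (PySem.Str.slice (String.ofList f) none (some max_length))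
            = String.ofList (PySem.List.slice f none (some max_length)) from by
        have h3 := congrArg String.ofList (str_slice_toList (String.ofList f) max_length)
        rw [String.ofList_toList] at h3
        rw [h3]
        simp]
    · simp only [hm, if_neg, not_false_eq_true]
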